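-- pv_equiv track=rewrite | github.com/TinaZhelyazova/02.-Python-Fundamentals | 08. Functions - Exercise/12.  Factorial Division.py | factorial_numbers
-- ===== SOURCE A (Python) =====
-- def factorial_numbers(number_one,number_two):
--     sum_of_first_factorial = 1
--     sum_of_second_factorial = 1
--
--     for i in range(number_one, 1, -1):
--         sum_of_first_factorial *= i
--
--     for j in range(number_two, 1, -1):
--         sum_of_second_factorial *= j
--
--     divided_sum = abs(sum_of_first_factorial // sum_of_second_factorial)
--     return f'{divided_sum:.2f}'
-- ===== SOURCE B (Python) =====
-- def factorial_numbers(number_one, number_two):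
--     upper = number_one if number_one > 1 else 1
--     lower = number_two if number_two > 1 else 1
--     if upper >= lower:
--         result = 1
--         for i in range(lower + 1, upper + 1):
--             result *= i
--     else:
--         result = 0
--     return f'{abs(result):.2f}'
-- ===== Notes on version B (the rewrite author's own statement) =====
-- stated objective: faster
-- what changed: Instead of computing both full factorials with countdown loops and floor-dividing, B multiplies only the cancelled gap range(lower+1, upper+1) (exact quotient) and returns 0 directly when the first number is smaller; formatting is the same f-string.
-- outside the precondition, e.g. on factorial_numbers(171, 170): A returns '171.00', B returns '171.00'; on factorial_numbers(171, 1): A raises OverflowError, B raises OverflowError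
import Mathlib
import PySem

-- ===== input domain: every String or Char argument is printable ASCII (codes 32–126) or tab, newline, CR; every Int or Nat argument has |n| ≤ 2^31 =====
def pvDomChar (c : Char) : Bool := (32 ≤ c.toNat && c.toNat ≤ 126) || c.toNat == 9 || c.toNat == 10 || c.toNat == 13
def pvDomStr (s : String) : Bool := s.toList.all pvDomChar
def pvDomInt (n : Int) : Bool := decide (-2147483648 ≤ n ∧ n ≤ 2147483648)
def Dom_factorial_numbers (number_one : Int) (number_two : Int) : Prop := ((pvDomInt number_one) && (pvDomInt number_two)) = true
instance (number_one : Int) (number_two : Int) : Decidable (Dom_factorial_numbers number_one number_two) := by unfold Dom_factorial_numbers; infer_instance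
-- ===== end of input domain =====

-- B replaces A's two full-factorial loops and big division by one loop over only the gap
-- range(lower+1, upper+1) (with an explicit 0 when upper < lower); same f'{…:.2f}' output.

-- Shared transliteration of Python's  f'{x:.2f}'  applied to a nonnegative int: CPython converts
-- the int to a double (round-to-nearest, ties-to-even) and prints that (integral) double exactly
-- with ".00" appended.  Exact for 0 ≤ n below the double overflow threshold (ensured by Pre_).
def pyFloatRound (m : Nat) : Nat :=
  if m < 2 ^ 53 then m
  else
    let k := m.log2 - 52
    let q := m / 2 ^ k
    let r := m % 2 ^ k
    (if 2 ^ k < r * 2 ∨ (r * 2 = 2 ^ k ∧ q % 2 = 1) then q + 1 else q) * 2 ^ k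

def pyFmtF2 (n : Int) : String :=
  PySem.Int.toStr ((pyFloatRound n.natAbs : Nat) : Int) ++ ".00"

-- ===== PORT A =====
def factorial_numbers (number_one : Int) (number_two : Int) : String :=
  let sum_of_first_factorial :=
    (PySem.List.pyRange number_one 1 (-1)).foldl (fun acc i => acc * i) 1
  let sum_of_second_factorial :=
    (PySem.List.pyRange number_two 1 (-1)).foldl (fun acc j => acc * j) 1
  let divided_sum := |PySem.Int.floordiv sum_of_first_factorial sum_of_second_factorial|
  pyFmtF2 divided_sum

-- ===== PORT B =====
def factorial_numbers_alt (number_one : Int) (number_two : Int) : String :=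
  let upper := if number_one > 1 then number_one else 1
  let lower := if number_two > 1 then number_two else 1
  let result :=
    if upper ≥ lower then
      (PySem.List.pyRange (lower + 1) (upper + 1) 1).foldl (fun acc i => acc * i) 1
    else 0
  pyFmtF2 |result|

-- ===== PRECONDITION & SPEC =====
-- Pre_ excludes inputs where CPython's f'{…:.2f}' raises OverflowError ("int too large to
-- convert to float"): for number_one > 170 with number_one > number_two the quotient
-- factorial(number_one)//factorial(number_two) can exceed the double range. The bound is
-- conservative, so it also excludes some inputs (number_two close below number_one) on which
-- A still returns; both programs return the same value there (see cites).
def Pre_factorial_numbers (number_one : Int) (number_two : Int) : Prop :=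
  number_one ≤ 170 ∨ number_one ≤ number_two
instance (number_one : Int) (number_two : Int) : Decidable (Pre_factorial_numbers number_one number_two) := by unfold Pre_factorial_numbers; infer_instance

def pvWitness_factorial_numbers : Int × Int := (5, 3)

def Spec_factorial_numbers (number_one : Int) (number_two : Int) (out : String) : Prop := out = factorial_numbers_alt number_one number_two
instance (number_one : Int) (number_two : Int) (out : String) : Decidable (Spec_factorial_numbers number_one number_two out) := by unfold Spec_factorial_numbers; infer_instance

-- ===== CLAIM (what is proved, stated in full; the proofs are below) =====
def Claim_equal_factorial_numbers : Prop := ∀ (number_one : Int) (number_two : Int), Dom_factorial_numbers number_one number_two → Pre_factorial_numbers number_one number_two → Spec_factorial_numbers number_one number_two (factorial_numbers number_one number_two)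

-- ===== LEMMAS AND PROOFS =====

-- product of the ascending range [lo, hi), as both ports fold it
def prodRange (lo hi : Int) : Int :=
  (PySem.List.pyRange lo hi 1).foldl (fun acc i => acc * i) 1

theorem foldl_mul_init (l : List Int) (c : Int) :
    l.foldl (fun acc i => acc * i) c = c * l.foldl (fun acc i => acc * i) 1 := by
  induction l generalizing c with
  | nil => simp
  | cons x t ih =>
    simp only [List.foldl_cons]
    rw [ih (c * x), ih (1 * x)]
    ring

theorem prodRange_nil {lo hi : Int} (h : hi ≤ lo) : prodRange lo hi = 1 := by
  simp [prodRange, PySem.List.pyRange_one_eq_nil h]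

theorem prodRange_cons {lo hi : Int} (h : lo < hi) :
    prodRange lo hi = lo * prodRange (lo + 1) hi := by
  rw [prodRange, PySem.List.pyRange_one_cons h, List.foldl_cons, foldl_mul_init]
  rw [prodRange]; ring

theorem prodRange_append {lo m hi : Int} (h1 : lo ≤ m) (h2 : m ≤ hi) :
    prodRange lo hi = prodRange lo m * prodRange m hi := by
  rw [prodRange, PySem.List.pyRange_one_append lo m hi h1 h2, List.foldl_append,
    foldl_mul_init]
  rfl

theorem prodRange_one_le (lo hi : Int) (h : 1 ≤ lo) : 1 ≤ prodRange lo hi := by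
  by_cases hlt : lo < hi
  · rw [prodRange_cons hlt]
    have ih := prodRange_one_le (lo + 1) hi (by omega)
    nlinarith
  · rw [prodRange_nil (by omega)]
termination_by (hi - lo).toNat
decreasing_by omega

theorem prodRange_two_le {lo hi : Int} (h2 : 2 ≤ lo) (hlt : lo < hi) :
    2 ≤ prodRange lo hi := by
  rw [prodRange_cons hlt]
  have := prodRange_one_le (lo + 1) hi (by omega)
  nlinarith

theorem foldl_mul_reverse (l : List Int) :
    l.reverse.foldl (fun acc i => acc * i) 1 = l.foldl (fun acc i => acc * i) 1 := by
  induction l with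
  | nil => rfl
  | cons x t ih =>
    rw [List.reverse_cons, List.foldl_append, List.foldl_cons, foldl_mul_init t.reverse, ih]
    simp only [List.foldl_cons, List.foldl_nil]
    rw [foldl_mul_init t (1 * x)]
    ring

-- A's countdown loop computes the factorial of max n 1 as an ascending-range product
theorem countdown_prod (n : Int) :
    (PySem.List.pyRange n 1 (-1)).foldl (fun acc i => acc * i) 1
      = prodRange 2 (max n 1 + 1) := by
  rw [PySem.List.pyRange_neg_one_eq_reverse, foldl_mul_reverse]
  by_cases h : 1 ≤ n
  · have : max n 1 = n := by omega
    rw [this]; rfl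
  · rw [show max n 1 = 1 by omega]
    rw [show prodRange 2 (1 + 1) = 1 from prodRange_nil (by omega)]
    have : PySem.List.pyRange 2 (n + 1) 1 = [] := PySem.List.pyRange_one_eq_nil (by omega)
    simp [this]

theorem if_max (x : Int) : (if x > 1 then x else 1) = max x 1 := by
  split_ifs <;> omega

-- the arithmetic core: A's |factorial // factorial| equals B's gap product (or 0)
theorem core_eq (a b : Int) :
    |PySem.Int.floordiv (prodRange 2 (max a 1 + 1)) (prodRange 2 (max b 1 + 1))|
      = |(if max a 1 ≥ max b 1 then prodRange (max b 1 + 1) (max a 1 + 1) else 0)| := by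
  set A' := max a 1 with hA
  set B' := max b 1 with hB
  have hA1 : 1 ≤ A' := le_max_right a 1
  have hB1 : 1 ≤ B' := le_max_right b 1
  have hbpos : (0 : Int) < prodRange 2 (B' + 1) := by
    have := prodRange_one_le 2 (B' + 1) (by omega); omega
  by_cases hge : B' ≤ A'
  · rw [if_pos hge]
    have hsplit : prodRange 2 (A' + 1) = prodRange 2 (B' + 1) * prodRange (B' + 1) (A' + 1) :=
      prodRange_append (by omega) (by omega)
    rw [hsplit, PySem.Int.floordiv_eq_ediv_of_pos hbpos,
      Int.mul_ediv_cancel_left _ (by omega)]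
  · rw [if_neg hge]
    rw [not_le] at hge
    have hsplit : prodRange 2 (B' + 1) = prodRange 2 (A' + 1) * prodRange (A' + 1) (B' + 1) :=
      prodRange_append (by omega) (by omega)
    have hapos : (1 : Int) ≤ prodRange 2 (A' + 1) := prodRange_one_le 2 (A' + 1) (by omega)
    have hgap : (2 : Int) ≤ prodRange (A' + 1) (B' + 1) :=
      prodRange_two_le (by omega) (by omega)
    have hlt : prodRange 2 (A' + 1) < prodRange 2 (B' + 1) := by nlinarith
    rw [PySem.Int.floordiv_eq_ediv_of_pos hbpos,
      Int.ediv_eq_zero_of_lt (by omega) hlt]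

-- ===== VERDICT (by name: the statement is the Claim_ definition above) =====
theorem factorial_numbers_spec : Claim_equal_factorial_numbers := by
  intro a b _ _
  unfold Spec_factorial_numbers factorial_numbers factorial_numbers_alt
  rw [if_max a, if_max b, countdown_prod a, countdown_prod b]
  exact congrArg pyFmtF2 (core_eq a b)
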